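-- pv_equiv track=rewrite | github.com/emsquid/epreuves-pratiques-nsi | Sujet 37/22-NSI-37.py | depouille
-- ===== SOURCE A (Python) =====
-- def depouille(urne):
--     resultat = dict()  # initialisation d'un dictionnaire vide
--     for bulletin in urne:
--         if bulletin in resultat.keys():  # si on a deja enregistre on incremente
--             resultat[bulletin] = resultat[bulletin] + 1
--         else:
--             resultat[bulletin] = 1  # sinon on initialise a 1
--     return resultat
-- ===== SOURCE B (Python) =====
-- def depouille(urne):
--     # distinct ballots in first-occurrence order, then count each by rescanning
--     return {b: urne.count(b) for b in dict.fromkeys(urne)}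
-- ===== Notes on version B (the rewrite author's own statement) =====
-- stated objective: simpler
-- what changed: B replaces A's single accumulating pass (lookup/increment per ballot) by a two-phase strategy: build the distinct ballots in first-occurrence order, then count each with urne.count in a comprehension.
import Mathlib
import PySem

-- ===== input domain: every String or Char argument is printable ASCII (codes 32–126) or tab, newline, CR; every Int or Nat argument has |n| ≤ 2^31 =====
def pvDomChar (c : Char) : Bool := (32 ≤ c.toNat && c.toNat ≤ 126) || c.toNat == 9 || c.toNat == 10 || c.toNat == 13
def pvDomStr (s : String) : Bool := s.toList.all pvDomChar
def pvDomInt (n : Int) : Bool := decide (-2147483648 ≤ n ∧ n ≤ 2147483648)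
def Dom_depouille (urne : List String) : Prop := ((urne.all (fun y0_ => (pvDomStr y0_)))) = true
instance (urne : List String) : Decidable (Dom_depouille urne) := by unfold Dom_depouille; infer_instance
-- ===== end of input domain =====

-- B replaces A's single accumulating dict pass by distinct-ballots-then-rescan counting (objective: simpler).

-- ===== PORT A =====
def depouille (urne : List String) : List (String × Int) :=
  (urne.foldl
    (fun resultat bulletin =>
      if resultat.contains bulletin then
        resultat.insert bulletin ((resultat.get? bulletin).getD 0 + 1)
      else
        resultat.insert bulletin 1)
    (PySem.Dict.empty : PySem.Dict String Int)).items

-- ===== PORT B =====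
def depouille_alt (urne : List String) : List (String × Int) :=
  (PySem.List.dedup urne).map (fun b => (b, (urne.count b : Int)))

-- ===== PRECONDITION & SPEC =====
def Spec_depouille (urne : List String) (out : List (String × Int)) : Prop := out = depouille_alt urne
instance (urne : List String) (out : List (String × Int)) : Decidable (Spec_depouille urne out) := by unfold Spec_depouille; infer_instance

-- ===== CLAIM (what is proved, stated in full; the proofs are below) =====
def Claim_equal_depouille : Prop := ∀ (urne : List String), Dom_depouille urne → Spec_depouille urne (depouille urne)

-- ===== LEMMAS AND PROOFS =====

-- A's loop body is extensionally the unconditional 'insert b (getD b 0 + 1)'.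
theorem depouille_step_eq :
    (fun (d : PySem.Dict String Int) (b : String) =>
      if d.contains b then d.insert b ((d.get? b).getD 0 + 1) else d.insert b 1)
    = (fun d b => d.insert b (d.getD b 0 + 1)) := by
  funext d b
  by_cases h : d.contains b = true
  · simp [h, PySem.Dict.getD_eq_get?_getD]
  · have h' : d.contains b = false := by simpa using h
    simp [h', PySem.Dict.getD_of_not_contains d 0 h']

-- ===== VERDICT (by name: the statement is the Claim_ definition above) =====
theorem depouille_spec : Claim_equal_depouille := by
  intro urne _
  unfold Spec_depouille depouille depouille_alt
  rw [depouille_step_eq, PySem.Dict.foldl_insert_getD_add_one_eq_counter,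
      PySem.Dict.items_counter, PySem.List.dedup_eq_ofList]
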